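-- pv_equiv track=rewrite | github.com/bzawadka/python-playground | tasks/test_cards.py | is_pair_in_the_deck
-- ===== SOURCE A (Python) =====
-- def is_pair_in_the_deck(deck: list[int]) -> bool:
--     card_counts = {-1: -1}
--     for c in deck:
--         card_counts[c] = card_counts.get(c, 0) + 1
--
--     for _, v in card_counts.items():
--         if v == 2:
--             return True
--
--     return False
-- ===== SOURCE B (Python) =====
-- def is_pair_in_the_deck(deck: list[int]) -> bool:
--     s = sorted(deck)
--     if not s:
--         return False
--     cur = s[0]
--     run = 1
--     for x in s[1:]:
--         if x == cur:
--             run += 1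
--         else:
--             if run == 2:
--                 return True
--             cur = x
--             run = 1
--     return run == 2
-- ===== Notes on version B (the rewrite author's own statement) =====
-- stated objective: alternative
-- what changed: B sorts a copy of the deck and scans contiguous equal runs for one of length exactly 2, instead of building a dict of counts and scanning its values; B also drops A's {-1:-1} seed, which makes A miscount the card -1.
-- intended difference: On decks where no card other than -1 appears exactly twice and -1 appears exactly 2 or 3 times, A's {-1:-1} seed makes it under-count -1 by one, so A returns False when -1 appears twice and True when it appears three times; B returns the intended answer (True resp. False), since -1 is a card like any other. — e.g. on is_pair_in_the_deck([-1, -1]): A returns false, B returns true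
import Mathlib
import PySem

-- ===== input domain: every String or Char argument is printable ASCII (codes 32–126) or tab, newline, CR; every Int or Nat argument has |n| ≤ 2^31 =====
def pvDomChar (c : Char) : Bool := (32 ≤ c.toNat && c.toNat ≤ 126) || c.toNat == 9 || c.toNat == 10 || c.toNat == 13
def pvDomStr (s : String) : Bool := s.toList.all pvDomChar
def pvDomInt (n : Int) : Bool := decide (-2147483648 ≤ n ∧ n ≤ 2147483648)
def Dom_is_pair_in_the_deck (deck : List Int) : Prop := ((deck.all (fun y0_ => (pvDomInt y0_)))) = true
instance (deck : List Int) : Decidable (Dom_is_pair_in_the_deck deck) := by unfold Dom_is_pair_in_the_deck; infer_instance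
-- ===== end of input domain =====

-- B replaces A's count-dict scan with a run-length scan over a sorted copy of the deck (the deck
-- argument itself is not mutated); B drops A's {-1:-1} seed, which makes A miscount the card -1
-- (stated as the intended difference D_ below).

-- ===== PORT A =====
-- A's second for-loop: scan the items, return True at the first value == 2
def pvAnyTwo : List (Int × Int) → Bool
  | [] => false
  | (_, v) :: rest => if v == 2 then true else pvAnyTwo rest

def is_pair_in_the_deck (deck : List Int) : Bool :=
  let card_counts : PySem.Dict Int Int := PySem.Dict.mk [(-1, -1)]
  let card_counts := deck.foldl (fun d c => d.insert c (d.getD c 0 + 1)) card_counts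
  pvAnyTwo card_counts.items

-- ===== PORT B =====
-- B's for-loop over s[1:], tracking (cur, run); early return True when a finished run has length 2
def pvRunScan (cur run : Int) : List Int → Bool
  | [] => run == 2
  | x :: xs =>
      if x == cur then pvRunScan cur (run + 1) xs
      else if run == 2 then true else pvRunScan x 1 xs

def is_pair_in_the_deck_alt (deck : List Int) : Bool :=
  match PySem.List.sorted deck (fun x => x) false with
  | [] => false
  | x :: xs => pvRunScan x 1 xs

-- ===== PRECONDITION & SPEC =====
-- On decks where no card other than -1 appears exactly twice and -1 appears exactly 2 or 3 times,
-- A's {-1: -1} seed under-counts the card -1 by one, so A returns False when -1 appears twice and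
-- True when it appears three times; B returns the intended answer (True resp. False), since -1 is
-- a card like any other.
def D_is_pair_in_the_deck (deck : List Int) : Prop :=
  (deck.count (-1) = 2 ∨ deck.count (-1) = 3) ∧
    ∀ k ∈ deck, k ≠ -1 → deck.count k ≠ 2
instance (deck : List Int) : Decidable (D_is_pair_in_the_deck deck) := by
  unfold D_is_pair_in_the_deck; infer_instance

def Spec_is_pair_in_the_deck (deck : List Int) (out : Bool) : Prop :=
  ¬ D_is_pair_in_the_deck deck → out = is_pair_in_the_deck_alt deck
instance (deck : List Int) (out : Bool) : Decidable (Spec_is_pair_in_the_deck deck out) := by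
  unfold Spec_is_pair_in_the_deck; infer_instance

def pvDiffWitness_is_pair_in_the_deck : List Int := [-1, -1]
def pvDiffWitnessOut_is_pair_in_the_deck : Bool × Bool := (false, true)

-- ===== CLAIM (what is proved, stated in full; the proofs are below) =====
def Claim_unchanged_is_pair_in_the_deck : Prop := ∀ (deck : List Int), Dom_is_pair_in_the_deck deck → Spec_is_pair_in_the_deck deck (is_pair_in_the_deck deck)
def Claim_changed_is_pair_in_the_deck : Prop := Dom_is_pair_in_the_deck (pvDiffWitness_is_pair_in_the_deck) ∧ D_is_pair_in_the_deck (pvDiffWitness_is_pair_in_the_deck) ∧ is_pair_in_the_deck (pvDiffWitness_is_pair_in_the_deck) = pvDiffWitnessOut_is_pair_in_the_deck.1 ∧ is_pair_in_the_deck_alt (pvDiffWitness_is_pair_in_the_deck) = pvDiffWitnessOut_is_pair_in_the_deck.2 ∧ pvDiffWitnessOut_is_pair_in_the_deck.1 ≠ pvDiffWitnessOut_is_pair_in_the_deck.2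
def Claim_exact_is_pair_in_the_deck : Prop := ∀ (deck : List Int), Dom_is_pair_in_the_deck deck → D_is_pair_in_the_deck deck → is_pair_in_the_deck deck ≠ is_pair_in_the_deck_alt deck

-- ===== LEMMAS AND PROOFS =====

-- A's items scan is an 'any'
lemma pvAnyTwo_eq_any (l : List (Int × Int)) : pvAnyTwo l = l.any (fun p => p.2 == 2) := by
  induction l with
  | nil => rfl
  | cons p rest ih =>
      obtain ⟨k, v⟩ := p
      rw [Bool.eq_iff_iff]
      simp [pvAnyTwo, ih]

-- characterisation of A: counts seeded with -1 at -1
lemma isPair_iff (deck : List Int) :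
    is_pair_in_the_deck deck = true ↔
      deck.count (-1) = 3 ∨ ∃ k ∈ deck, k ≠ -1 ∧ deck.count k = 2 := by
  have hd0 : ∀ k : Int, (PySem.Dict.mk [((-1:Int), (-1:Int))]).getD k 0 = if k = -1 then -1 else 0 := by
    intro k
    by_cases hk : k = -1
    · subst hk; simp [PySem.Dict.getD, PySem.Dict.get?_mk_cons]
    · rw [if_neg hk]
      simp [PySem.Dict.getD, Ne.symm hk, PySem.Dict.get?]
  have hnd : (deck.foldl (fun d c => d.insert c (d.getD c 0 + 1)) (PySem.Dict.mk [((-1:Int), (-1:Int))])).keys.Nodup :=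
    PySem.Dict.nodup_keys_foldl_insert _ _ _ (by decide)
  rw [is_pair_in_the_deck]
  simp only [pvAnyTwo_eq_any, PySem.Dict.items_eq_map_keys _ hnd 0,
    List.any_map, List.any_eq_true, Function.comp,
    PySem.Dict.getD_foldl_insert_add_one, hd0,
    PySem.Dict.keys_foldl_insert, PySem.Set.mem_update, beq_iff_eq]
  constructor
  · rintro ⟨k, hk, h2⟩
    by_cases hkm : k = -1
    · subst hkm; left; simp at h2; omega
    · right
      rcases hk with h | h
      · simp [PySem.Dict.keys_mk] at h; exact absurd h hkm
      · exact ⟨k, h, hkm, by simp [hkm] at h2; omega⟩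
  · rintro (h | ⟨k, hk, hkm, h2⟩)
    · exact ⟨-1, Or.inl (by simp [PySem.Dict.keys_mk]), by simp; omega⟩
    · exact ⟨k, Or.inr hk, by simp [hkm]; omega⟩

-- B's run scan on a sorted tail: a run of length exactly 2 exists iff some count is exactly 2
lemma pvRunScan_spec (l : List Int) : ∀ (cur run : Int),
    l.Pairwise (· ≤ ·) → (∀ y ∈ l, cur ≤ y) →
    (pvRunScan cur run l = true ↔
      (run + (l.count cur : Int) = 2 ∨ ∃ k ∈ l, k ≠ cur ∧ l.count k = 2)) := by
  induction l with
  | nil => intro cur run _ _; simp [pvRunScan]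
  | cons x xs ih =>
    intro cur run hpw hall
    rw [List.pairwise_cons] at hpw
    obtain ⟨hx, hpw'⟩ := hpw
    by_cases hxc : x = cur
    · subst hxc
      rw [pvRunScan, if_pos (by simp)]
      rw [ih x (run + 1) hpw' hx]
      constructor
      · rintro (h | ⟨k, hk, hkx, h2⟩)
        · left; simp [List.count_cons]; omega
        · right; exact ⟨k, List.mem_cons_of_mem _ hk, hkx, by simp [Ne.symm hkx, h2]⟩
      · rintro (h | ⟨k, hk, hkx, h2⟩)
        · left; simp at h; omega
        · right
          rcases List.mem_cons.mp hk with h | h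
          · exact absurd h hkx
          · exact ⟨k, h, hkx, by simpa [Ne.symm hkx] using h2⟩
    · have hlt : cur < x := lt_of_le_of_ne (hall x (List.mem_cons_self)) (Ne.symm hxc)
      have hcurnot : cur ∉ xs := fun h => absurd (hx cur h) (not_le.mpr hlt)
      have hc0 : (x :: xs).count cur = 0 := by
        rw [List.count_eq_zero]
        simp only [List.mem_cons, not_or]
        exact ⟨fun h => hxc h.symm, hcurnot⟩
      rw [pvRunScan, if_neg (by simp [hxc])]
      by_cases hr : run = 2
      · subst hr
        simp only [if_pos (by simp : ((2:Int) == 2) = true)]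
        simp [hc0]
      · rw [if_neg (by simp [hr])]
        rw [ih x 1 hpw' (fun y hy => hx y hy)]
        constructor
        · rintro (h | ⟨k, hk, hkx, h2⟩)
          · right
            exact ⟨x, List.mem_cons_self, hlt.ne', by simp; omega⟩
          · right
            refine ⟨k, List.mem_cons_of_mem _ hk, ?_, by simp [Ne.symm hkx, h2]⟩
            exact (lt_of_lt_of_le hlt (hx k hk)).ne'
        · rintro (h | ⟨k, hk, hkc, h2⟩)
          · exfalso; rw [hc0] at h; push_cast at h; omega
          · by_cases hkx2 : k = x
            · subst hkx2
              left
              have hq : xs.count k + 1 = 2 := by simpa [List.count_cons] using h2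
              omega
            · right
              have hmem : k ∈ xs := (List.mem_cons.mp hk).resolve_left hkx2
              exact ⟨k, hmem, hkx2, by simpa [Ne.symm hkx2] using h2⟩

-- characterisation of B
lemma isPairAlt_iff (deck : List Int) :
    is_pair_in_the_deck_alt deck = true ↔ ∃ k ∈ deck, deck.count k = 2 := by
  rw [is_pair_in_the_deck_alt]
  rcases hs : PySem.List.sorted deck (fun x => x) false with _ | ⟨x, xs⟩
  · have hnil : deck = [] := by rwa [PySem.List.sorted_eq_nil_iff] at hs
    subst hnil; simp
  · have hperm : (x :: xs).Perm deck := hs ▸ PySem.List.sorted_perm deck _ _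
    have hpw : (x :: xs).Pairwise (· ≤ ·) := by
      have := PySem.List.sorted_pairwise deck (fun x => x) (κ := Int)
      rw [hs] at this
      simpa using this
    rw [List.pairwise_cons] at hpw
    rw [pvRunScan_spec xs x 1 hpw.2 hpw.1]
    constructor
    · rintro (h | ⟨k, hk, hkx, h2⟩)
      · refine ⟨x, hperm.mem_iff.mp List.mem_cons_self, ?_⟩
        have hc := hperm.count_eq x
        simp [List.count_cons] at hc
        omega
      · refine ⟨k, hperm.mem_iff.mp (List.mem_cons_of_mem _ hk), ?_⟩
        have hc := hperm.count_eq k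
        simp [List.count_cons, Ne.symm hkx] at hc
        omega
    · rintro ⟨k, hk, h2⟩
      have hk' : k ∈ x :: xs := hperm.mem_iff.mpr hk
      have hc := hperm.count_eq k
      by_cases hkx : k = x
      · subst hkx
        left
        simp [List.count_cons] at hc
        omega
      · right
        refine ⟨k, (List.mem_cons.mp hk').resolve_left hkx, hkx, ?_⟩
        simp [List.count_cons, Ne.symm hkx] at hc
        omega

-- ===== VERDICT (by name: the statement is the Claim_ definition above) =====
theorem is_pair_in_the_deck_spec : Claim_unchanged_is_pair_in_the_deck := by
  intro deck _ hD
  rw [Bool.eq_iff_iff, isPair_iff, isPairAlt_iff]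
  unfold D_is_pair_in_the_deck at hD
  by_cases hex : ∃ k ∈ deck, k ≠ -1 ∧ deck.count k = 2
  · obtain ⟨k, hk, hkm, hc⟩ := hex
    constructor
    · intro _; exact ⟨k, hk, hc⟩
    · intro _; exact Or.inr ⟨k, hk, hkm, hc⟩
  · have hno : ∀ k ∈ deck, k ≠ -1 → deck.count k ≠ 2 := by
      intro k hk hkm hc; exact hex ⟨k, hk, hkm, hc⟩
    have h23 : ¬(deck.count (-1) = 2 ∨ deck.count (-1) = 3) := fun h => hD ⟨h, hno⟩
    constructor
    · rintro (h3 | hex2)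
      · exact absurd (Or.inr h3) h23
      · exact absurd hex2 hex
    · rintro ⟨k, hk, hc⟩
      by_cases hkm : k = -1
      · subst hkm; exact absurd (Or.inl hc) h23
      · exact absurd ⟨k, hk, hkm, hc⟩ hex

theorem is_pair_in_the_deck_changed : Claim_changed_is_pair_in_the_deck := by
  unfold Claim_changed_is_pair_in_the_deck; decide

theorem is_pair_in_the_deck_tight : Claim_exact_is_pair_in_the_deck := by
  intro deck _ hD heq
  obtain ⟨h23, hno⟩ := hD
  have hA := isPair_iff deck
  have hB := isPairAlt_iff deck
  rcases h23 with h2 | h3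
  · have hBtrue : is_pair_in_the_deck_alt deck = true :=
      hB.mpr ⟨-1, List.count_pos_iff.mp (by omega), h2⟩
    have hAfalse : is_pair_in_the_deck deck ≠ true := by
      intro h
      rcases hA.mp h with h3 | ⟨k, hk, hkm, hc⟩
      · omega
      · exact hno k hk hkm hc
    rw [heq, hBtrue] at hAfalse
    exact hAfalse rfl
  · have hAtrue : is_pair_in_the_deck deck = true := hA.mpr (Or.inl h3)
    have hBfalse : is_pair_in_the_deck_alt deck ≠ true := by
      intro h
      obtain ⟨k, hk, hc⟩ := hB.mp h
      by_cases hkm : k = -1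
      · subst hkm; omega
      · exact hno k hk hkm hc
    rw [← heq, hAtrue] at hBfalse
    exact hBfalse rfl
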